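-- pv_equiv track=rewrite | github.com/luminousphotonics/photonics | main/light_opt22.py | determine_active_layers
-- ===== SOURCE A (Python) =====
-- def determine_active_layers(floor_width, floor_length):
--     layer_dimensions = [
--         (0, 0), (3, 3), (5, 5), (8, 8), (11, 11),
--         (14, 14), (17, 17), (20, 20), (23, 23), (26, 26), (29, 29)
--     ]
--     active_layers = 0
--     for i in range(1, len(layer_dimensions)):
--         required_width, required_length = layer_dimensions[i]
--         if floor_width >= required_width and floor_length >= required_length:
--             active_layers = i
--         else:
--             break
--     return active_layers
-- ===== SOURCE B (Python) =====
-- import bisect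
--
-- _THRESHOLDS = [3, 5, 8, 11, 14, 17, 20, 23, 26, 29]
--
-- def determine_active_layers(floor_width, floor_length):
--     return bisect.bisect_right(_THRESHOLDS, min(floor_width, floor_length))
-- ===== Notes on version B (the rewrite author's own statement) =====
-- stated objective: idiomatic
-- what changed: Replaced the index loop with break over (width,length) pairs by a min-reduction of the two dimensions plus bisect_right on a bare sorted threshold list (binary search counting thresholds cleared).
import Mathlib
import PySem

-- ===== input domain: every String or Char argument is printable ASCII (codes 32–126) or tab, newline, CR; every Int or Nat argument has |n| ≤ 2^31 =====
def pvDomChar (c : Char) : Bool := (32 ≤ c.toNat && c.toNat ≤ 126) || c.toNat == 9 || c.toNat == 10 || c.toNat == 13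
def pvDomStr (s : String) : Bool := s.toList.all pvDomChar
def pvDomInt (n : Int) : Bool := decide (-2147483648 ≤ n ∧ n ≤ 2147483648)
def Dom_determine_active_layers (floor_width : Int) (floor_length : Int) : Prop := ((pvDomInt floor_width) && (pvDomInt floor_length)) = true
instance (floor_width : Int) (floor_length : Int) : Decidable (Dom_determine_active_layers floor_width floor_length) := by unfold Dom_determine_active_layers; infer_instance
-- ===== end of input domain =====

-- B replaces A's scan-with-break over (width,length) pairs by min + bisect_right on a bare threshold list; objective: idiomatic.

-- ===== PORT A =====
-- the loop 'for i in range(1, len(layer_dimensions))' with break, carrying active_layers;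
-- elements are paired with their index i starting from 1.
def pvALoop (floor_width floor_length : Int) : List (Int × (Int × Int)) → Int → Int
  | [], acc => acc
  | (i, (rw, rl)) :: rest, acc =>
      if floor_width ≥ rw ∧ floor_length ≥ rl then pvALoop floor_width floor_length rest i
      else acc

def determine_active_layers (floor_width : Int) (floor_length : Int) : Int :=
  pvALoop floor_width floor_length
    [(1,(3,3)),(2,(5,5)),(3,(8,8)),(4,(11,11)),(5,(14,14)),
     (6,(17,17)),(7,(20,20)),(8,(23,23)),(9,(26,26)),(10,(29,29))] 0

-- ===== PORT B =====
-- bisect.bisect_right on a sorted list = number of elements ≤ key (ported as countP, exact for sorted input)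
def pvThresholds : List Int := [3, 5, 8, 11, 14, 17, 20, 23, 26, 29]

def determine_active_layers_alt (floor_width : Int) (floor_length : Int) : Int :=
  (pvThresholds.countP (fun t => t ≤ min floor_width floor_length) : Int)

-- ===== PRECONDITION & SPEC =====
def Spec_determine_active_layers (floor_width : Int) (floor_length : Int) (out : Int) : Prop := out = determine_active_layers_alt floor_width floor_length
instance (floor_width : Int) (floor_length : Int) (out : Int) : Decidable (Spec_determine_active_layers floor_width floor_length out) := by unfold Spec_determine_active_layers; infer_instance

-- ===== CLAIM (what is proved, stated in full; the proofs are below) =====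
def Claim_equal_determine_active_layers : Prop := ∀ (floor_width : Int) (floor_length : Int), Dom_determine_active_layers floor_width floor_length → Spec_determine_active_layers floor_width floor_length (determine_active_layers floor_width floor_length)

-- ===== LEMMAS AND PROOFS =====

-- ===== VERDICT (by name: the statement is the Claim_ definition above) =====
set_option maxHeartbeats 1000000 in
theorem determine_active_layers_spec : Claim_equal_determine_active_layers := by
  intro fw fl _
  unfold Spec_determine_active_layers determine_active_layers determine_active_layers_alt pvThresholds
  simp only [pvALoop, List.countP_cons, List.countP_nil, decide_eq_true_eq,
    ge_iff_le, ← le_min_iff]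
  split_ifs <;> omega
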